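-- pv_equiv track=rewrite | github.com/NilsSonntag/advent-of-code | 2023/10/sol10.py | possible_in
-- ===== SOURCE A (Python) =====
-- from typing import Tuple, Any, List, Dict
--
-- def possible_in(data: Any) -> List[Tuple[int, int]]:
--     result = []
--     #counted_hashtags = count_hashtags(data)
--
--     for line in data:
--         parts = line.split('#')
--
--         columns = []
--         for i in range(len(parts)):
--             current_col = sum(len(parts[j])+1 for j in range(0,i))
--             if parts[i] != '':
--                 columns.append(current_col)
--
--         parts = list(filter(lambda a: a != '', parts))
--
--         i = 1
--         while i in range(len(parts)):
--             #calc current_col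
--             current_col = columns[i] #TODO: check if this is correct
--
--             for a in range(len(parts[i])):
--                 result.append((data.index(line), current_col+a))
--
--             i += 2
--
--     return result
-- ===== SOURCE B (Python) =====
-- from typing import Tuple, Any, List
--
-- def possible_in(data: Any) -> List[Tuple[int, int]]:
--     # one pass per line over its characters; dict of first indices replaces data.index
--     first = {}
--     for idx, line in enumerate(data):
--         if line not in first:
--             first[line] = idx
--     result = []
--     for line in data:
--         row = first[line]
--         parity = 0
--         start = 0
--         for col, ch in enumerate(line):
--             if ch == '#':
--                 if start < col:
--                     if parity % 2 == 1:
--                         for c in range(start, col):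
--                             result.append((row, c))
--                     parity += 1
--                 start = col + 1
--         if start < len(line) and parity % 2 == 1:
--             for c in range(start, len(line)):
--                 result.append((row, c))
--     return result
-- ===== Notes on version B (the rewrite author's own statement) =====
-- stated objective: faster
-- what changed: Replaces per-line split('#') with quadratic prefix-sum column computation plus a repeated O(n) data.index(line) per emitted cell by a single character scan per line tracking run start and parity, and a dict of first indices built once.
import Mathlib
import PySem

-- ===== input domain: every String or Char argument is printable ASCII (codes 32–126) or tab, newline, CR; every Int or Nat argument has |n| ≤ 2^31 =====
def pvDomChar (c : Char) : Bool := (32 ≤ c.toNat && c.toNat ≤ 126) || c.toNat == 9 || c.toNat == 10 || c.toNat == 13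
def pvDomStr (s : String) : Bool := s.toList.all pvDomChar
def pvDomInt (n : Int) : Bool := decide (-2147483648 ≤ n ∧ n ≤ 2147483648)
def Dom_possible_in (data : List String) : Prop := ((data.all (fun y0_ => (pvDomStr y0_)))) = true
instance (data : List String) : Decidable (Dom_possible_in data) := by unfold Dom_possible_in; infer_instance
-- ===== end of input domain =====

-- B replaces A's quadratic per-line prefix sums and repeated data.index by a single
-- character scan per line plus a first-index dict (objective: faster).

-- ===== PORT A =====
-- columns loop: for i in range(len(parts)): current_col = sum(len(parts[j])+1 for j in range(0,i)); if parts[i] != '': columns.append(current_col)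
def pyA_cols (parts : List (List Char)) : List Int :=
  (PySem.List.pyRange 0 (parts.length : Int) 1).foldl
    (fun columns i =>
      let current_col :=
        ((PySem.List.pyRange 0 i 1).map
          (fun j => ((PySem.List.pyGetD parts j []).length : Int) + 1)).sum
      if PySem.List.pyGetD parts i [] ≠ [] then columns ++ [current_col] else columns)
    []

-- i = 1; while i in range(len(parts)): for a in range(len(parts[i])): result.append((data.index(line), current_col+a)); i += 2
def pyA_while (data : List String) (line : String) (parts2 : List (List Char))
    (columns : List Int) (i : Nat) (result : List (Int × Int)) : List (Int × Int) :=
  if h : i < parts2.length then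
    let current_col := PySem.List.pyGetD columns (i : Int) 0
    pyA_while data line parts2 columns (i + 2)
      (result ++ (PySem.List.pyRange 0 ((parts2[i].length : Int)) 1).map
        (fun a => ((((PySem.List.index? data line).getD 0 : Nat) : Int), current_col + a)))
  else result
termination_by parts2.length - i

def possible_in (data : List String) : List (Int × Int) :=
  data.foldl (fun result line =>
    let parts := PySem.Chars.splitOn line.toList "#".toList
    let columns := pyA_cols parts
    let parts2 := parts.filter (fun a => a ≠ [])
    pyA_while data line parts2 columns 1 result) []

-- ===== PORT B =====
-- first = {}; for idx, line in enumerate(data): if line not in first: first[line] = idx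
def pvFirst (data : List String) : PySem.Dict String Int :=
  (PySem.List.enumerate data 0).foldl
    (fun d p => if d.contains p.2 then d else d.insert p.2 p.1) PySem.Dict.empty

-- one step of the per-line character scan; state = (parity, start, result)
def pvScanStep (row : Int) (st : Int × Int × List (Int × Int)) (cc : Int × Char) :
    Int × Int × List (Int × Int) :=
  if cc.2 = '#' then
    if st.2.1 < cc.1 then
      (st.1 + 1, cc.1 + 1,
        if st.1 % 2 = 1 then
          st.2.2 ++ (PySem.List.pyRange st.2.1 cc.1 1).map (fun c => (row, c))
        else st.2.2)
    else (st.1, cc.1 + 1, st.2.2)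
  else st

-- for col, ch in enumerate(line): … ; final flush of the last run
def pvScanLine (row : Int) (cs : List Char) (result : List (Int × Int)) : List (Int × Int) :=
  let st := (PySem.List.enumerate cs 0).foldl (pvScanStep row) (0, 0, result)
  if st.2.1 < (cs.length : Int) ∧ st.1 % 2 = 1 then
    st.2.2 ++ (PySem.List.pyRange st.2.1 (cs.length : Int) 1).map (fun c => (row, c))
  else st.2.2

def possible_in_alt (data : List String) : List (Int × Int) :=
  let first := pvFirst data
  data.foldl (fun result line =>
    pvScanLine (first.getD line 0) line.toList result) []

-- ===== PRECONDITION & SPEC =====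
def Spec_possible_in (data : List String) (out : List (Int × Int)) : Prop := out = possible_in_alt data
instance (data : List String) (out : List (Int × Int)) : Decidable (Spec_possible_in data out) := by unfold Spec_possible_in; infer_instance

-- ===== CLAIM (what is proved, stated in full; the proofs are below) =====
def Claim_equal_possible_in : Prop := ∀ (data : List String), Dom_possible_in data → Spec_possible_in data (possible_in data)

-- ===== LEMMAS AND PROOFS =====

def pvRunsP : List Char → Int → Int → List (Int × Int)
  | [], p, start => if start < p then [(start, p)] else []
  | c :: t, p, start =>
    if c = '#' then
      if start < p then (start, p) :: pvRunsP t (p + 1) (p + 1) else pvRunsP t (p + 1) (p + 1)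
    else pvRunsP t (p + 1) start

def pvEmit (row : Int) : Bool → List (Int × Int) → List (Int × Int)
  | _, [] => []
  | b, (s, e) :: rs =>
    (if b then (PySem.List.pyRange s e 1).map (fun c => (row, c)) else []) ++ pvEmit row (!b) rs

def pvPws : List (List Char) → Int → List (Int × List Char)
  | [], _ => []
  | q :: rest, p => (p, q) :: pvPws rest (p + q.length + 1)

def pvIval (x : Int × List Char) : Int × Int := (x.1, x.1 + (x.2.length : Int))

def pvIntervals (l : List (Int × List Char)) : List (Int × Int) :=
  (l.filter (fun x => x.2 ≠ [])).map pvIval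

def pvSize (qs : List (List Char)) : Int := (qs.map (fun q => (q.length : Int) + 1)).sum

def pyAW (row : Int) (NE : List (Int × List Char)) (i : Nat) : List (Int × Int) :=
  if h : i < NE.length then
    (PySem.List.pyRange 0 ((NE[i].2.length : Int)) 1).map (fun a => (row, NE[i].1 + a))
      ++ pyAW row NE (i + 2)
  else []
termination_by NE.length - i

lemma pv_splitOn_go (fuel : Nat) : ∀ (l cur : List Char) (acc : List (List Char)),
    l.length ≤ fuel →
    PySem.Chars.splitOn.go ['#'] fuel l cur acc
      = acc.reverse ++ (l.splitOn '#').modifyHead (fun x => cur.reverse ++ x) := by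
  induction fuel with
  | zero =>
    intro l cur acc h
    have : l = [] := List.eq_nil_of_length_eq_zero (Nat.le_zero.mp h)
    subst this
    simp [PySem.Chars.splitOn.go, List.splitOn, List.splitOnP_nil]
  | succ fuel ih =>
    intro l cur acc h
    match l with
    | [] => simp [PySem.Chars.splitOn.go, List.splitOn, List.splitOnP_nil]
    | c :: rest =>
      have hlen : rest.length ≤ fuel := by simpa using h
      by_cases hc : c = '#'
      · subst hc
        rw [show PySem.Chars.splitOn.go ['#'] (fuel+1) ('#'::rest) cur acc
              = PySem.Chars.splitOn.go ['#'] fuel rest [] (cur.reverse :: acc) by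
            simp [PySem.Chars.splitOn.go, List.isPrefixOf]]
        rw [ih rest [] (cur.reverse :: acc) hlen]
        rw [show ('#'::rest).splitOn '#' = [] :: rest.splitOn '#' by
            simp [List.splitOn, List.splitOnP_cons]]
        cases rest.splitOn '#' <;> simp
      · rw [show PySem.Chars.splitOn.go ['#'] (fuel+1) (c::rest) cur acc
              = PySem.Chars.splitOn.go ['#'] fuel rest (c :: cur) acc by
            simp only [PySem.Chars.splitOn.go, List.isPrefixOf]
            rw [if_neg]
            intro hh
            have : '#' = c := by simpa using hh
            exact hc this.symm]
        rw [ih rest (c :: cur) acc hlen]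
        rw [show (c::rest).splitOn '#' = (rest.splitOn '#').modifyHead (List.cons c) by
            simp [List.splitOn, List.splitOnP_cons, hc]]
        cases rest.splitOn '#' <;> simp

lemma pv_splitOn_eq (cs : List Char) : PySem.Chars.splitOn cs ['#'] = cs.splitOn '#' := by
  rw [PySem.Chars.splitOn, pv_splitOn_go (cs.length+1) cs [] [] (by omega)]
  cases h : cs.splitOn '#' <;> simp

lemma pv_sum_take (parts : List (List Char)) : ∀ (k : Nat), k ≤ parts.length →
    ((PySem.List.pyRange 0 (k : Int) 1).map
      (fun j => ((PySem.List.pyGetD parts j []).length : Int) + 1)).sum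
      = pvSize (parts.take k) := by
  intro k
  induction k with
  | zero => intro _; simp [pvSize, PySem.List.pyRange_one_eq_nil]
  | succ k ih =>
    intro hk
    have hk' : k ≤ parts.length := by omega
    have h0 : ((k:Int)+1) = ((k+1 : Nat) : Int) := by push_cast; ring
    rw [show ((k+1 : Nat) : Int) = (k:Int) + 1 by push_cast; ring,
        PySem.List.pyRange_one_succ_right (by positivity)]
    rw [List.map_append, List.sum_append, ih hk']
    have hget : PySem.List.pyGetD parts (k : Int) [] = parts[k]! := by
      rw [PySem.List.pyGetD_natCast]
      simp [List.getD_eq_getElem?_getD, List.getElem!_eq_getElem?_getD]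
      rfl
    have htake : parts.take (k+1) = parts.take k ++ [parts[k]'(by omega)] := by
      rw [List.take_add_one]; simp [List.getElem?_eq_getElem (by omega : k < parts.length)]
    rw [htake]
    simp [pvSize, hget, List.getElem!_eq_getElem?_getD, List.getElem?_eq_getElem (by omega : k < parts.length)]
    rw [List.take_add_one]
    simp [List.getElem?_eq_getElem (by omega : k < parts.length), List.sum_append]

lemma pv_pws_append (xs : List (List Char)) (q : List Char) : ∀ (p : Int),
    pvPws (xs ++ [q]) p = pvPws xs p ++ [(p + pvSize xs, q)] := by
  induction xs with
  | nil => intro p; simp [pvPws, pvSize]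
  | cons x xs ih =>
    intro p
    simp only [List.cons_append, pvPws, ih, pvSize, List.map_cons, List.sum_cons]
    rw [show p + (x.length:Int) + 1 + (List.map (fun q => (q.length:Int) + 1) xs).sum
          = p + ((x.length:Int) + 1 + (List.map (fun q => (q.length:Int) + 1) xs).sum) by ring]

lemma pv_cols_aux (parts : List (List Char)) : ∀ (k : Nat), k ≤ parts.length →
    (PySem.List.pyRange 0 (k : Int) 1).foldl
      (fun columns i =>
        let current_col :=
          ((PySem.List.pyRange 0 i 1).map
            (fun j => ((PySem.List.pyGetD parts j []).length : Int) + 1)).sum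
        if PySem.List.pyGetD parts i [] ≠ [] then columns ++ [current_col] else columns)
      []
    = ((pvPws (parts.take k) 0).filter (fun x => x.2 ≠ [])).map (·.1) := by
  intro k
  induction k with
  | zero => intro _; simp [PySem.List.pyRange_one_eq_nil, pvPws]
  | succ k ih =>
    intro hk
    have hk' : k ≤ parts.length := by omega
    have hklt : k < parts.length := by omega
    rw [show ((k+1 : Nat) : Int) = (k:Int) + 1 by push_cast; ring,
        PySem.List.pyRange_one_succ_right (by positivity), List.foldl_append, ih hk']
    have hget : PySem.List.pyGetD parts (k : Int) [] = parts[k] := by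
      rw [PySem.List.pyGetD_natCast]
      simp [List.getD_eq_getElem?_getD, List.getElem?_eq_getElem hklt]
    have htake : parts.take (k+1) = parts.take k ++ [parts[k]] := by
      rw [List.take_add_one]
      simp [List.getElem?_eq_getElem hklt]
    rw [htake, show (0:Int) = 0 by rfl]
    rw [pv_pws_append]
    simp only [List.foldl_cons, List.foldl_nil, hget, pv_sum_take parts k hk',
      List.filter_append, List.map_append]
    by_cases hne : parts[k] = [] <;> simp [hne]

lemma pv_cols_eq (parts : List (List Char)) :
    pyA_cols parts = ((pvPws parts 0).filter (fun x => x.2 ≠ [])).map (·.1) := by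
  have := pv_cols_aux parts parts.length (le_refl _)
  simpa [pyA_cols] using this

lemma pv_filter_eq (parts : List (List Char)) : ∀ (p : Int),
    parts.filter (fun a => a ≠ []) = ((pvPws parts p).filter (fun x => x.2 ≠ [])).map (·.2) := by
  induction parts with
  | nil => intro p; simp [pvPws]
  | cons q rest ih =>
    intro p
    simp only [pvPws, List.filter_cons]
    by_cases hq : q = [] <;> simp [hq] <;> simpa using ih _

lemma pv_while_eq (data : List String) (line : String) (NE : List (Int × List Char)) :
    ∀ (n i : Nat), NE.length - i ≤ n → ∀ (res : List (Int × Int)),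
    pyA_while data line (NE.map (·.2)) (NE.map (·.1)) i res
      = res ++ pyAW (((PySem.List.index? data line).getD 0 : Nat) : Int) NE i := by
  intro n
  induction n with
  | zero =>
    intro i hi res
    have h1 : ¬ i < NE.length := by omega
    rw [pyA_while, pyAW]
    simp [h1]
  | succ n ih =>
    intro i hi res
    rw [pyA_while, pyAW]
    by_cases h1 : i < NE.length
    · simp only [List.length_map, h1, dif_pos]
      rw [ih (i+2) (by omega)]
      have hcol : PySem.List.pyGetD (NE.map (·.1)) (i : Int) 0 = NE[i].1 := by
        rw [PySem.List.pyGetD_natCast]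
        simp [List.getD_eq_getElem?_getD, h1]
      have hpart : (NE.map (·.2))[i]'(by simpa using h1) = NE[i].2 := by simp
      rw [hcol, hpart, List.append_assoc]
    · simp [h1]

lemma pv_pyAW_shift (row : Int) (x : Int × List Char) (NE : List (Int × List Char)) :
    ∀ (n i : Nat), NE.length - i ≤ n → pyAW row (x :: NE) (i + 1) = pyAW row NE i := by
  intro n
  induction n with
  | zero =>
    intro i hi
    have h1 : ¬ i < NE.length := by omega
    conv_lhs => rw [pyAW]
    conv_rhs => rw [pyAW]
    simp [h1]
  | succ n ih =>
    intro i hi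
    by_cases h1 : i < NE.length
    · have h2 : i + 1 < (x :: NE).length := by simp; omega
      conv_lhs => rw [pyAW]
      simp only [h2, dif_pos]
      rw [show i + 1 + 2 = (i + 2) + 1 by omega, ih (i+2) (by omega)]
      conv_rhs => rw [pyAW]
      simp only [h1, dif_pos]
      congr 1
    · conv_lhs => rw [pyAW]
      conv_rhs => rw [pyAW]
      simp [h1]

lemma pv_range_reindex (row s : Int) (m : Nat) :
    (PySem.List.pyRange 0 ((m : Int)) 1).map (fun a => (row, s + a))
      = (PySem.List.pyRange s (s + (m : Int)) 1).map (fun c => (row, c)) := by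
  rw [PySem.List.pyRange_one, PySem.List.pyRange_one]
  simp [List.map_map, Function.comp_def]

lemma pv_pyAW_emit (row : Int) (NE : List (Int × List Char)) :
    pyAW row NE 0 = pvEmit row true (NE.map pvIval)
      ∧ pyAW row NE 1 = pvEmit row false (NE.map pvIval) := by
  induction NE with
  | nil => constructor <;> (rw [pyAW]; simp [pvEmit])
  | cons x NE ih =>
    have hshift0 : pyAW row (x :: NE) 1 = pyAW row NE 0 :=
      pv_pyAW_shift row x NE NE.length 0 (by omega)
    constructor
    · rw [pyAW]
      have h0 : 0 < (x :: NE).length := by simp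
      simp only [h0, dif_pos]
      rw [show (0:Nat) + 2 = 1 + 1 by rfl, pv_pyAW_shift row x NE NE.length 1 (by omega), ih.2]
      simp only [List.map_cons, pvEmit, pvIval]
      rw [pv_range_reindex]
      simp
    · rw [hshift0, ih.1]
      simp [pvEmit, pvIval]

lemma pv_scan_emit (row : Int) (cs : List Char) :
    ∀ (p parity start : Int) (acc : List (Int × Int)), start ≤ p →
    (let st := (PySem.List.enumerate cs p).foldl (pvScanStep row) (parity, start, acc)
     if st.2.1 < p + (cs.length : Int) ∧ st.1 % 2 = 1 then
       st.2.2 ++ (PySem.List.pyRange st.2.1 (p + (cs.length : Int)) 1).map (fun c => (row, c))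
     else st.2.2)
      = acc ++ pvEmit row (decide (parity % 2 = 1)) (pvRunsP cs p start) := by
  induction cs with
  | nil =>
    intro p parity start acc hsp
    simp only [PySem.List.enumerate_nil, List.foldl_nil, List.length_nil, Nat.cast_zero, add_zero,
      pvRunsP]
    by_cases hlt : start < p
    · simp only [hlt, if_pos]
      by_cases hpar : parity % 2 = 1 <;> simp [hpar, pvEmit]
    · simp only [hlt, if_neg, not_false_iff]
      simp [pvEmit]
  | cons c t ih =>
    intro p parity start acc hsp
    rw [PySem.List.enumerate_cons]
    simp only [List.foldl_cons, List.length_cons]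
    have hlen : p + ((t.length + 1 : Nat) : Int) = (p + 1) + (t.length : Int) := by push_cast; ring
    by_cases hc : c = '#'
    · by_cases hlt : start < p
      · have hstep : pvScanStep row (parity, start, acc) (p, c)
            = (parity + 1, p + 1,
               if parity % 2 = 1 then
                 acc ++ (PySem.List.pyRange start p 1).map (fun c => (row, c))
               else acc) := by
          simp [pvScanStep, hc, hlt]
        rw [hstep]
        have := ih (p+1) (parity+1) (p+1)
          (if parity % 2 = 1 then acc ++ (PySem.List.pyRange start p 1).map (fun c => (row, c)) else acc)
          (le_refl _)
        simp only [hlen]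
        rw [this]
        simp only [pvRunsP, hc, if_pos, hlt, pvEmit]
        have hpar : (decide ((parity + 1) % 2 = 1)) = !(decide (parity % 2 = 1)) := by
          by_cases h : parity % 2 = 1 <;> simp [h] <;> omega
        rw [hpar]
        by_cases h : parity % 2 = 1 <;> simp [h]
      · have hstep : pvScanStep row (parity, start, acc) (p, c) = (parity, p + 1, acc) := by
          simp [pvScanStep, hc, hlt]
        rw [hstep]
        have := ih (p+1) parity (p+1) acc (le_refl _)
        simp only [hlen]
        rw [this]
        simp [pvRunsP, hc, hlt]
    · have hstep : pvScanStep row (parity, start, acc) (p, c) = (parity, start, acc) := by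
        simp [pvScanStep, hc]
      rw [hstep]
      have := ih (p+1) parity start acc (by omega)
      simp only [hlen]
      rw [this]
      simp [pvRunsP, hc]

lemma pv_bridge (t : List Char) : ∀ p : Int,
    (pvIntervals (pvPws (t.splitOn '#') p) = pvRunsP t p p)
    ∧ (∀ start : Int, start < p →
        pvRunsP t p start
          = (start, p + (((t.splitOn '#').headI.length : Int)))
            :: pvIntervals (pvPws ((t.splitOn '#').tail)
                (p + ((t.splitOn '#').headI.length : Int) + 1))) := by
  induction t with
  | nil =>
    intro p
    constructor
    · simp [List.splitOn, List.splitOnP_nil, pvPws, pvIntervals, pvRunsP]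
    · intro start hs
      simp [List.splitOn, List.splitOnP_nil, pvPws, pvIntervals, pvRunsP, hs]
  | cons c t ih =>
    intro p
    by_cases hc : c = '#'
    · subst hc
      have hsplit : ('#'::t).splitOn '#' = [] :: t.splitOn '#' := by
        simp [List.splitOn, List.splitOnP_cons]
      constructor
      · rw [hsplit]
        simp only [pvPws, pvIntervals, List.filter_cons]
        simp only [pvRunsP, lt_irrefl]
        have := (ih (p+1)).1
        simp only [pvIntervals] at this
        simpa using this
      · intro start hs
        rw [hsplit]
        simp only [pvRunsP, hs, if_pos]
        have := (ih (p+1)).1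
        simp only [pvIntervals] at this
        simp only [List.headI, List.tail, List.length_nil, Nat.cast_zero, add_zero, pvIntervals]
        rw [this]
      
    · have hne : t.splitOn '#' ≠ [] := List.splitOnP_ne_nil _ _
      obtain ⟨q, rest, hq⟩ := List.exists_cons_of_ne_nil hne
      have hsplit : (c::t).splitOn '#' = (c :: q) :: rest := by
        simp [List.splitOn, List.splitOnP_cons, hc]
        rw [show (List.splitOnP (fun x => x == '#') t) = q :: rest by
          simpa [List.splitOn] using hq]
        rfl
      constructor
      · rw [hsplit]
        simp only [pvRunsP, hc, pvIntervals, pvPws, List.filter_cons]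
        have hb := (ih (p+1)).2 p (by omega)
        rw [hq] at hb
        simp only [List.headI, List.tail] at hb
        have e1 : p + 1 + (q.length : Int) = p + (((c :: q).length : Nat) : Int) := by
          simp; ring
        rw [hb, e1]
        simp [pvIntervals, pvIval]
      · intro start hs
        rw [hsplit]
        simp only [pvRunsP, hc]
        have hb := (ih (p+1)).2 start (by omega)
        rw [hq] at hb
        simp only [List.headI, List.tail] at hb
        have e1 : p + 1 + (q.length : Int) = p + (((c :: q).length : Nat) : Int) := by
          simp; ring
        rw [hb, e1]
        simp [List.headI, List.tail]

lemma pv_first_go (xs : List String) : ∀ (s : Int) (d : PySem.Dict String Int) (line : String),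
    ((PySem.List.enumerate xs s).foldl
        (fun d p => if d.contains p.2 then d else d.insert p.2 p.1) d).get? line
      = if d.contains line then d.get? line
        else (PySem.List.index? xs line).map (fun k => s + (k : Int)) := by
  induction xs with
  | nil =>
    intro s d line
    simp only [PySem.List.enumerate_nil, List.foldl_nil]
    by_cases h : d.contains line
    · simp [h]
    · simp only [h, Bool.false_eq_true, if_neg, not_false_iff]
      rw [(PySem.List.index?_eq_none_iff _ _).mpr (by simp)]
      have : (d.get? line).isSome = false := by
        rw [← PySem.Dict.contains_eq_isSome_get?]; simpa using h
      exact Option.not_isSome_iff_eq_none.mp (by simp [this])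
  | cons x xs ih =>
    intro s d line
    rw [PySem.List.enumerate_cons]
    simp only [List.foldl_cons]
    by_cases hc : d.contains x
    · simp only [hc, if_pos]
      rw [ih (s+1) d line]
      by_cases hl : d.contains line
      · simp [hl]
      · simp only [hl, Bool.false_eq_true, if_neg, not_false_iff]
        have hxl : x ≠ line := fun h => hl (h ▸ hc)
        rw [PySem.List.index?_cons_of_ne xs hxl]
        cases PySem.List.index? xs line <;> simp
        ring
    · simp only [hc, Bool.false_eq_true, if_neg, not_false_iff]
      rw [ih (s+1) (d.insert x s) line]
      by_cases hxl : line = x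
      · subst hxl
        rw [PySem.List.index?_cons_self]
        simp [PySem.Dict.contains_insert_self, PySem.Dict.get?_insert_self, hc]
      · rw [PySem.Dict.contains_insert, PySem.Dict.get?_insert_of_ne _ _ hxl]
        have hbx : (line == x) = false := beq_eq_false_iff_ne.mpr hxl
        rw [hbx]
        simp only [Bool.false_or]
        by_cases hl : d.contains line
        · simp [hl]
        · simp only [hl, Bool.false_eq_true, if_neg, not_false_iff]
          rw [PySem.List.index?_cons_of_ne xs (fun h => hxl h.symm)]
          cases PySem.List.index? xs line <;> simp
          ring

lemma pv_first_getD (data : List String) (line : String) (h : line ∈ data) :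
    (pvFirst data).getD line 0 = (((PySem.List.index? data line).getD 0 : Nat) : Int) := by
  rw [PySem.Dict.getD_eq_get?_getD, pvFirst, pv_first_go data 0 PySem.Dict.empty line]
  simp only [PySem.Dict.contains_empty, Bool.false_eq_true, if_neg, not_false_iff]
  obtain ⟨k, hk⟩ := Option.isSome_iff_exists.mp ((PySem.List.index?_isSome_iff _ _).mpr h)
  rw [hk]
  simp

lemma pv_line_eq (data : List String) (line : String) (h : line ∈ data)
    (res : List (Int × Int)) :
    (let parts := PySem.Chars.splitOn line.toList "#".toList
     pyA_while data line (parts.filter (fun a => a ≠ [])) (pyA_cols parts) 1 res)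
      = pvScanLine ((pvFirst data).getD line 0) line.toList res := by
  have hhash : ("#" : String).toList = ['#'] := rfl
  set row : Int := (((PySem.List.index? data line).getD 0 : Nat) : Int) with hrow
  -- A side
  simp only [hhash, pv_splitOn_eq]
  set parts := line.toList.splitOn '#' with hparts
  rw [pv_cols_eq parts, pv_filter_eq parts 0]
  set NE := (pvPws parts 0).filter (fun x => x.2 ≠ []) with hNE
  rw [pv_while_eq data line NE NE.length 1 (by omega) res, (pv_pyAW_emit row NE).2]
  have hNEmap : NE.map pvIval = pvIntervals (pvPws parts 0) := rfl
  rw [hNEmap, (pv_bridge line.toList 0).1]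
  -- B side
  have hrow' : (pvFirst data).getD line 0 = row := pv_first_getD data line h
  rw [hrow', pvScanLine]
  have := pv_scan_emit row line.toList 0 0 0 res (le_refl 0)
  simp only [zero_add] at this
  rw [this]
  norm_num

-- ===== VERDICT (by name: the statement is the Claim_ definition above) =====
theorem possible_in_spec : Claim_equal_possible_in := by
  intro data _
  unfold Spec_possible_in possible_in possible_in_alt
  exact PySem.List.foldl_congr_mem data _ _ []
    (fun res line hl => pv_line_eq data line hl res)
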